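-- pv_equiv track=rewrite | github.com/GeorgeS1995/education | Last_element_to_begin_VanoReview.py | last_elem_to_begin
-- ===== SOURCE A (Python) =====
-- def last_elem_to_begin (elem):
--     i = len(elem) - 1 #Так как отсчет с 0 идет
--     last_elem = elem[len(elem) - 1] #Запоминаю последний элемент, так как конструкция ниже делает из 12345 11234
--     while i > 0:
--         elem[i] = elem[i - 1]
--         i -= 1
--     elem[0] = last_elem
--     return elem
-- ===== SOURCE B (Python) =====
-- def last_elem_to_begin(elem):
--     elem.insert(0, elem.pop())
--     return elem
-- ===== Notes on version B (the rewrite author's own statement) =====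
-- stated objective: idiomatic
-- what changed: Replaces the manual index-shift while loop with in-place pop of the last element followed by insert at the front.
-- outside the precondition, e.g. on last_elem_to_begin([]): A raises IndexError, B raises IndexError
import Mathlib
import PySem

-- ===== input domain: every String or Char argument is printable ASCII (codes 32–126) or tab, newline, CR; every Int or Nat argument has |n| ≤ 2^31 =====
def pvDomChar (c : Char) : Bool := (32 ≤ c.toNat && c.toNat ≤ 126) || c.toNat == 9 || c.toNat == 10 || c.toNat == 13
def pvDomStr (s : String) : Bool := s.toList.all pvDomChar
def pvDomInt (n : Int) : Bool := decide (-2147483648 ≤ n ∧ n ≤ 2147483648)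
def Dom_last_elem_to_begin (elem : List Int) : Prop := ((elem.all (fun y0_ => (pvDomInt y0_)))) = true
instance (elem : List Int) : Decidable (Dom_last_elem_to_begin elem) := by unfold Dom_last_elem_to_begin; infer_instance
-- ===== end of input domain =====

-- Both programs mutate the list in place; the equivalence proved here is about the returned
-- value (which is the same mutated list). B is the idiomatic pop-then-insert rotation.


-- ===== PORT A =====
-- the while loop: for i = k, k-1, …, 1 do elem[i] := elem[i-1]
def pvShiftLoop (xs : List Int) : Nat → List Int
  | 0 => xs
  | Nat.succ k => pvShiftLoop (xs.set (k + 1) (xs.getD k 0)) k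

def last_elem_to_begin (elem : List Int) : List Int :=
  match PySem.List.pyGet? elem ((elem.length : Int) - 1) with
  | none => []   -- Python raises IndexError here (empty list); excluded by Pre_
  | some last_elem => (pvShiftLoop elem (elem.length - 1)).set 0 last_elem

-- ===== PORT B =====
def last_elem_to_begin_alt (elem : List Int) : List Int :=
  match PySem.List.pop? elem (-1) with
  | none => []   -- Python raises IndexError here (empty list); excluded by Pre_
  | some (last, rest) => PySem.List.insert rest 0 last

-- ===== PRECONDITION & SPEC =====
-- A raises IndexError on the empty list (elem[len(elem)-1]); excluded.
def Pre_last_elem_to_begin (elem : List Int) : Prop := elem ≠ []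
instance (elem : List Int) : Decidable (Pre_last_elem_to_begin elem) := by unfold Pre_last_elem_to_begin; infer_instance
def pvWitness_last_elem_to_begin : List Int := [1, 2, 3]

def Spec_last_elem_to_begin (elem : List Int) (out : List Int) : Prop := out = last_elem_to_begin_alt elem
instance (elem : List Int) (out : List Int) : Decidable (Spec_last_elem_to_begin elem out) := by unfold Spec_last_elem_to_begin; infer_instance

-- ===== CLAIM (what is proved, stated in full; the proofs are below) =====
def Claim_equal_last_elem_to_begin : Prop := ∀ (elem : List Int), Dom_last_elem_to_begin elem → Pre_last_elem_to_begin elem → Spec_last_elem_to_begin elem (last_elem_to_begin elem)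

-- ===== LEMMAS AND PROOFS =====

-- After iterations i = k,…,1 the list holds xs[0] at 0, xs[0..k-1] at 1..k, and the tail unchanged.
theorem pvShiftLoop_eq (k : Nat) : ∀ (xs : List Int), k + 1 ≤ xs.length →
    pvShiftLoop xs k = xs.take 1 ++ xs.take k ++ xs.drop (k + 1) := by
  induction k with
  | zero =>
    intro xs h
    cases xs with
    | nil => simp at h
    | cons a t => simp [pvShiftLoop]
  | succ k ih =>
    intro xs h
    have hk1 : k + 1 < xs.length := by omega
    rw [pvShiftLoop, ih _ (by simpa using Nat.le_of_lt hk1)]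
    have hget : xs.getD k 0 = xs[k] := List.getD_eq_getElem xs 0 (by omega)
    rw [hget]
    apply List.ext_getElem
    · simp; omega
    · intro i h1 h2
      simp only [List.getElem_append, List.getElem_take, List.getElem_drop,
        List.length_append, List.length_take, List.length_set,
        List.getElem_set]
      split_ifs <;>
        first
          | rfl
          | omega
          | (congr 1; omega)

theorem last_elem_to_begin_eq (elem : List Int) (h : elem ≠ []) :
    last_elem_to_begin elem = elem.getLast h :: elem.dropLast := by
  have hlen : 0 < elem.length := List.length_pos_iff.mpr h
  have hidx : PySem.List.pyGet? elem ((elem.length : Int) - 1) = some (elem.getLast h) := by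
    have h1 : ((elem.length : Int) - 1) = ((elem.length - 1 : Nat) : Int) := by
      push_cast [Nat.cast_sub hlen]; ring
    rw [h1, PySem.List.pyGet?_natCast]
    rw [List.getElem?_eq_getElem (by omega)]
    simp [List.getLast_eq_getElem]
  rw [last_elem_to_begin, hidx]
  rw [pvShiftLoop_eq _ _ (by omega)]
  have hd : elem.drop (elem.length - 1 + 1) = [] := by
    apply List.drop_eq_nil_of_le; omega
  rw [hd, List.append_nil]
  rcases elem with _ | ⟨a, t⟩
  · exact absurd rfl h
  · simp [List.dropLast_eq_take]

theorem last_elem_to_begin_alt_eq (elem : List Int) (h : elem ≠ []) :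
    last_elem_to_begin_alt elem = elem.getLast h :: elem.dropLast := by
  rw [last_elem_to_begin_alt]
  conv_lhs => rw [← List.dropLast_append_getLast h]
  rw [PySem.List.pop?_last]
  simp [PySem.List.insert_zero]

-- ===== VERDICT (by name: the statement is the Claim_ definition above) =====
theorem last_elem_to_begin_spec : Claim_equal_last_elem_to_begin := by
  intro elem _ hpre
  unfold Spec_last_elem_to_begin
  rw [last_elem_to_begin_eq elem hpre, last_elem_to_begin_alt_eq elem hpre]
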